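-- pv_equiv track=rewrite | github.com/crisotocdev/pygame-Ajedrez | main.py | path_clear_between
-- ===== SOURCE A (Python) =====
-- def path_clear_between(a, b, blockers):
--     """True si entre a=(x1,y) y b=(x2,y) no hay piezas (excluye extremos)."""
--     (x1,y1), (x2,y2) = a, b
--     if y1 != y2: return False
--     lo, hi = sorted([x1, x2])
--     for x in range(lo+1, hi):
--         if (x, y1) in blockers:
--             return False
--     return True
-- ===== SOURCE B (Python) =====
-- def path_clear_between(a, b, blockers):
--     """True si entre a=(x1,y) y b=(x2,y) no hay piezas (excluye extremos)."""
--     (x1, y1), (x2, y2) = a, b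
--     if y1 != y2:
--         return False
--     lo, hi = (x1, x2) if x1 <= x2 else (x2, x1)
--     for bx, by in blockers:
--         if by == y1 and lo < bx < hi:
--             return False
--     return True
-- ===== Notes on version B (the rewrite author's own statement) =====
-- stated objective: faster
-- what changed: Instead of scanning every intermediate x cell of the path and testing membership in blockers, B makes one pass over the blockers collection and rejects any blocker on the same row strictly between the endpoints.
import Mathlib
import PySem

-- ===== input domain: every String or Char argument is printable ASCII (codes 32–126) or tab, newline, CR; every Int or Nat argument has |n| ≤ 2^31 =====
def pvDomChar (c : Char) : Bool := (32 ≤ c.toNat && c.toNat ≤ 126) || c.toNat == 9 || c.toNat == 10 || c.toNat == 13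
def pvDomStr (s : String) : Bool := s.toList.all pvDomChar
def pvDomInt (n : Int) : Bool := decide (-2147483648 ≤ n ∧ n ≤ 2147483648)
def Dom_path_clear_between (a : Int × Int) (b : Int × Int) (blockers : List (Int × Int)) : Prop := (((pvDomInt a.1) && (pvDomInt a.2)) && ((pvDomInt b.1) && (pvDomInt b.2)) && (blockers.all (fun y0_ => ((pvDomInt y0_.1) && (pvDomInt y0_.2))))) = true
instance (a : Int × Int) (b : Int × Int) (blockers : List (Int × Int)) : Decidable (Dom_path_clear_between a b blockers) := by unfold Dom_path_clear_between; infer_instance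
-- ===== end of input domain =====

-- ===== PORT A =====
-- Port of A: scan every intermediate x of the path, membership test in blockers.
def path_clear_between (a : Int × Int) (b : Int × Int) (blockers : List (Int × Int)) : Bool :=
  let x1 := a.1; let y1 := a.2; let x2 := b.1; let y2 := b.2
  if y1 ≠ y2 then false
  else
    let lo := min x1 x2
    let hi := max x1 x2
    !((PySem.List.pyRange (lo + 1) hi 1).any (fun x => blockers.contains (x, y1)))

-- ===== PORT B =====
-- Port of B: one pass over the blockers list, early exit on a blocker in the open interval.
def pcbScan (y1 lo hi : Int) : List (Int × Int) → Bool
  | [] => true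
  | p :: rest => if p.2 == y1 && decide (lo < p.1) && decide (p.1 < hi) then false
                 else pcbScan y1 lo hi rest

def path_clear_between_alt (a : Int × Int) (b : Int × Int) (blockers : List (Int × Int)) : Bool :=
  if a.2 ≠ b.2 then false
  else
    let lohi := if a.1 ≤ b.1 then (a.1, b.1) else (b.1, a.1)
    pcbScan a.2 lohi.1 lohi.2 blockers

-- ===== PRECONDITION & SPEC =====
def Spec_path_clear_between (a : Int × Int) (b : Int × Int) (blockers : List (Int × Int)) (out : Bool) : Prop := out = path_clear_between_alt a b blockers
instance (a : Int × Int) (b : Int × Int) (blockers : List (Int × Int)) (out : Bool) : Decidable (Spec_path_clear_between a b blockers out) := by unfold Spec_path_clear_between; infer_instance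

-- ===== CLAIM (what is proved, stated in full; the proofs are below) =====
def Claim_equal_path_clear_between : Prop := ∀ (a : Int × Int) (b : Int × Int) (blockers : List (Int × Int)), Dom_path_clear_between a b blockers → Spec_path_clear_between a b blockers (path_clear_between a b blockers)

-- ===== LEMMAS AND PROOFS =====

lemma pcbScan_eq_any (y lo hi : Int) (l : List (Int × Int)) :
    pcbScan y lo hi l = !(l.any fun p => p.2 == y && decide (lo < p.1) && decide (p.1 < hi)) := by
  induction l with
  | nil => rfl
  | cons p rest ih =>
    simp only [pcbScan, List.any_cons]
    split_ifs with h
    · simp [h]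
    · simp [h, ih]

-- ===== VERDICT (by name: the statement is the Claim_ definition above) =====
theorem path_clear_between_spec : Claim_equal_path_clear_between := by
  intro a b blockers _
  obtain ⟨x1, y1⟩ := a
  obtain ⟨x2, y2⟩ := b
  unfold Spec_path_clear_between path_clear_between path_clear_between_alt
  by_cases hy : y1 = y2
  · subst hy
    simp only [ne_eq, not_true_eq_false, if_false]
    have hlohi : (if x1 ≤ x2 then (x1, x2) else (x2, x1)) = (min x1 x2, max x1 x2) := by
      split_ifs with h <;> simp [min_def, max_def, h]
    rw [hlohi, pcbScan_eq_any]
    congr 1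
    rw [Bool.eq_iff_iff]
    simp only [List.any_eq_true, PySem.List.mem_pyRange_one]
    constructor
    · rintro ⟨x, ⟨h1, h2⟩, hc⟩
      rw [List.contains_iff_mem] at hc
      exact ⟨(x, y1), hc, by simp; omega⟩
    · rintro ⟨⟨bx, by'⟩, hmem, hcond⟩
      simp only [Bool.and_eq_true, beq_iff_eq, decide_eq_true_eq] at hcond
      obtain ⟨⟨hb, h1⟩, h2⟩ := hcond
      exact ⟨bx, ⟨by omega, h2⟩, by rw [List.contains_iff_mem]; subst hb; exact hmem⟩
  · simp [hy]
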